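-- pv_equiv track=rewrite | github.com/AbductiveLearning/ABLkit | ablkit/utils/utils.py | reform_list
-- ===== SOURCE A (Python) =====
-- from typing import List, Any, Union, Tuple, Optional
--
-- def reform_list(
--     flattened_list: List[Any], structured_list: List[Union[Any, List[Any], Tuple[Any, ...]]]
-- ) -> List[List[Any]]:
--     """
--     Reform the list based on the structure of ``structured_list``.
--
--     Parameters
--     ----------
--     flattened_list : List[Any]
--         A flattened list of elements.
--     structured_list : List[Union[Any, List[Any], Tuple[Any, ...]]]
--         A list that reflects the desired structure, which may contain sublists or tuples.
--
--     Returns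
--     -------
--     List[List[Any]]
--         A reformed list that mimics the structure of ``structured_list``.
--     """
--     if not isinstance(structured_list[0], (list, tuple)):
--         return flattened_list
--
--     reformed_list = []
--     idx_start = 0
--     for elem in structured_list:
--         idx_end = idx_start + len(elem)
--         reformed_list.append(flattened_list[idx_start:idx_end])
--         idx_start = idx_end
--
--     return reformed_list
-- ===== SOURCE B (Python) =====
-- def reform_list(flattened_list, structured_list):
--     if not isinstance(structured_list[0], (list, tuple)):
--         return flattened_list
--
--     def go(rest, struct):
--         if not struct:
--             return []
--         head, rest_tail = rest[:len(struct[0])], rest[len(struct[0]):]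
--         return [head] + go(rest_tail, struct[1:])
--
--     return go(flattened_list, structured_list)
-- ===== Notes on version B (the rewrite author's own statement) =====
-- stated objective: alternative
-- what changed: Replaces A's index-accumulating loop over the whole flat list with a structural recursion that splits each group off the front of the remaining flat list (take/drop of the remainder, no indices); it trades index arithmetic for copying the remainder, so it is not faster.
import Mathlib
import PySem

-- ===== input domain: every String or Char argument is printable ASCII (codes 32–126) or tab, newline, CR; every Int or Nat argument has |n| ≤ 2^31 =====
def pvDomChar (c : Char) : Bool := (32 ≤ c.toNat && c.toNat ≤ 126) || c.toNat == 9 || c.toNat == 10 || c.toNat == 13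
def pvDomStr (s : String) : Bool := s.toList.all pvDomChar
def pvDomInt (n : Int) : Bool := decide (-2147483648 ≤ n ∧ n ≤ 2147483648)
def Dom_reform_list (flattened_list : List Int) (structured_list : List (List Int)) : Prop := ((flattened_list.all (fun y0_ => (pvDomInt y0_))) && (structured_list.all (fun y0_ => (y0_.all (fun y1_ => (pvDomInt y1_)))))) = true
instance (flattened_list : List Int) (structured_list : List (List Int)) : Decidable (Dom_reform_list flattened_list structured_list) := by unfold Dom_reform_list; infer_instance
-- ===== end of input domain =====

-- B replaces A's index-accumulating loop over the whole flat list with a structural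
-- recursion that splits each group off the front of the remaining flat list
-- (take/drop on the remainder, no indices).  Objective: alternative.


-- ===== PORT A =====
-- Python A first evaluates structured_list[0] (IndexError on an empty list — excluded by
-- Pre_); the isinstance(…, (list, tuple)) guard is always false on the List (List Int)
-- domain, so the early return never fires here.  Then the loop with the running idx_start.
def reform_list (flattened_list : List Int) (structured_list : List (List Int)) : List (List Int) :=
  (structured_list.foldl
    (fun (st : List (List Int) × Int) elem =>
      let idx_end := st.2 + (elem.length : Int)
      (st.1 ++ [PySem.List.slice flattened_list (some st.2) (some idx_end)], idx_end))
    ([], 0)).1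

-- ===== PORT B =====
-- go(rest, struct): split rest[:len(struct[0])] / rest[len(struct[0]):] and recurse.
def reform_list_alt_go (rest : List Int) : List (List Int) → List (List Int)
  | [] => []
  | e :: tl =>
      let head := PySem.List.slice rest none (some ((e.length : Int)))
      let rest_tail := PySem.List.slice rest (some ((e.length : Int))) none
      head :: reform_list_alt_go rest_tail tl

def reform_list_alt (flattened_list : List Int) (structured_list : List (List Int)) : List (List Int) :=
  reform_list_alt_go flattened_list structured_list

-- ===== PRECONDITION & SPEC =====
-- Pre_ excludes only the empty structured_list, where A's structured_list[0] raises IndexError.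
def Pre_reform_list (flattened_list : List Int) (structured_list : List (List Int)) : Prop :=
  structured_list ≠ []
instance (flattened_list : List Int) (structured_list : List (List Int)) : Decidable (Pre_reform_list flattened_list structured_list) := by unfold Pre_reform_list; infer_instance
def pvWitness_reform_list : List Int × List (List Int) := ([1, 2, 3], [[7], [8, 9]])

def Spec_reform_list (flattened_list : List Int) (structured_list : List (List Int)) (out : List (List Int)) : Prop := out = reform_list_alt flattened_list structured_list
instance (flattened_list : List Int) (structured_list : List (List Int)) (out : List (List Int)) : Decidable (Spec_reform_list flattened_list structured_list out) := by unfold Spec_reform_list; infer_instance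

-- ===== CLAIM (what is proved, stated in full; the proofs are below) =====
def Claim_equal_reform_list : Prop := ∀ (flattened_list : List Int) (structured_list : List (List Int)), Dom_reform_list flattened_list structured_list → Pre_reform_list flattened_list structured_list → Spec_reform_list flattened_list structured_list (reform_list flattened_list structured_list)

-- ===== LEMMAS AND PROOFS =====

-- Loop invariant: A's fold started at accumulator `acc` and start index `s` produces
-- `acc` followed by B's recursion applied to the remainder `fl.drop s`.
theorem reform_list_key (fl : List Int) :
    ∀ (sl : List (List Int)) (s : Nat) (acc : List (List Int)),
    (sl.foldl
      (fun (st : List (List Int) × Int) elem =>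
        let idx_end := st.2 + (elem.length : Int)
        (st.1 ++ [PySem.List.slice fl (some st.2) (some idx_end)], idx_end))
      (acc, (s : Int))).1
    = acc ++ reform_list_alt_go (fl.drop s) sl := by
  intro sl
  induction sl with
  | nil => intro s acc; simp [reform_list_alt_go]
  | cons hd tl ih =>
      intro s acc
      simp only [List.foldl_cons, reform_list_alt_go,
        PySem.List.slice_to_natCast, PySem.List.slice_from_natCast]
      have hcast : (s : Int) + (hd.length : Int) = ((s + hd.length : Nat) : Int) := by
        push_cast; ring
      rw [hcast, ih (s + hd.length) _]
      rw [PySem.List.slice_natCast]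
      simp [List.drop_drop, Nat.add_comm]

-- ===== VERDICT (by name: the statement is the Claim_ definition above) =====
theorem reform_list_spec : Claim_equal_reform_list := by
  intro fl sl _ _
  unfold Spec_reform_list reform_list reform_list_alt
  have := reform_list_key fl sl 0 []
  simpa using this
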